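-- pv_equiv track=rewrite | github.com/SSH1007/Algorithm | 프로그래머스/lv1/1845. 폰켓몬/폰켓몬.py | solution
-- ===== SOURCE A (Python) =====
-- def solution(nums):
--     dic = dict()
--     for n in nums:
--         if n not in dic:
--             dic[n] = 1
--         else:
--             dic[n] += 1
--     answer = min(len(nums)//2, len(dic))
--     return answer
-- ===== SOURCE B (Python) =====
-- def solution(nums):
--     s = sorted(nums)
--     distinct = 0
--     prev = None
--     for x in s:
--         if prev is None or x != prev:
--             distinct += 1
--         prev = x
--     return min(len(nums) // 2, distinct)
-- ===== Notes on version B (the rewrite author's own statement) =====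
-- stated objective: alternative
-- what changed: B derives the distinct count by sorting the list and scanning once for changes between adjacent elements, instead of building a per-element hash-map of counts.
import Mathlib
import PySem

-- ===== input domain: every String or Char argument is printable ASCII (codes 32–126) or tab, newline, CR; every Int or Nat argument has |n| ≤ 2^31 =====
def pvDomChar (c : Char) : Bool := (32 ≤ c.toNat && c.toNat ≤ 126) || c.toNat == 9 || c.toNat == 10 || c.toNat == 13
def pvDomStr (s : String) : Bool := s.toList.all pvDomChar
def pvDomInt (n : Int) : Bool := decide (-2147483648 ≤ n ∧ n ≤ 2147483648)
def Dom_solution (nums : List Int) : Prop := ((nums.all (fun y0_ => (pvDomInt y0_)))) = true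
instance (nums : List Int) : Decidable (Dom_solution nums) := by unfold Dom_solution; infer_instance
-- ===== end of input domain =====

-- B computes the distinct count by sort-and-adjacent-scan instead of A's hash-map of counts (alternative decomposition, same result).


-- ===== PORT A =====
def solution (nums : List Int) : Int :=
  let dic := nums.foldl (fun dic n =>
    if dic.contains n = false then dic.insert n 1
    else dic.insert n (dic.getD n 0 + 1)) (PySem.Dict.empty (κ := Int) (ν := Int))
  min (PySem.Int.floordiv (PySem.List.len nums) 2) (PySem.Dict.size dic : Int)

-- ===== PORT B =====
-- loop body of B: state = (distinct, prev); 'if prev is None or x != prev: distinct += 1; prev = x'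
def bstep (acc : Int × Option Int) (x : Int) : Int × Option Int :=
  (if acc.2 = none ∨ acc.2 ≠ some x then acc.1 + 1 else acc.1, some x)

def solution_alt (nums : List Int) : Int :=
  let s := PySem.List.sorted nums (fun x => x) false
  let st := s.foldl bstep (0, none)
  min (PySem.Int.floordiv (PySem.List.len nums) 2) st.1

-- ===== PRECONDITION & SPEC =====
def Spec_solution (nums : List Int) (out : Int) : Prop := out = solution_alt nums
instance (nums : List Int) (out : Int) : Decidable (Spec_solution nums out) := by unfold Spec_solution; infer_instance

-- ===== CLAIM (what is proved, stated in full; the proofs are below) =====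
def Claim_equal_solution : Prop := ∀ (nums : List Int), Dom_solution nums → Spec_solution nums (solution nums)

-- ===== LEMMAS AND PROOFS =====

-- inserting an element that may or may not be present: card grows from the erased set
theorem card_insert_erase (s : Finset Int) (a : Int) :
    (insert a s).card = (s.erase a).card + 1 := by
  by_cases h : a ∈ s
  · rw [Finset.insert_eq_self.mpr h, Finset.card_erase_add_one h]
  · rw [Finset.card_insert_of_notMem h, Finset.erase_eq_of_notMem h]

-- The size of A's dictionary is the number of distinct elements of nums.
theorem solnA_size (nums : List Int) :
    PySem.Dict.size (nums.foldl (fun dic n =>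
      if dic.contains n = false then dic.insert n 1
      else dic.insert n (dic.getD n 0 + 1)) (PySem.Dict.empty (κ := Int) (ν := Int)))
      = nums.toFinset.card := by
  have hcongr : nums.foldl (fun dic n =>
      if dic.contains n = false then dic.insert n 1
      else dic.insert n (dic.getD n 0 + 1)) (PySem.Dict.empty (κ := Int) (ν := Int))
      = nums.foldl (fun dic n =>
      dic.insert n (if dic.contains n = false then 1 else dic.getD n 0 + 1))
        (PySem.Dict.empty (κ := Int) (ν := Int)) := by
    apply PySem.List.foldl_congr_mem
    intro d n _
    by_cases h : d.contains n = false <;> simp [h]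
  rw [hcongr]
  have hsize : ∀ (d : PySem.Dict Int Int), PySem.Dict.size d = d.keys.length := by
    intro d; simp [PySem.Dict.size, PySem.Dict.keys]
  rw [hsize]
  rw [PySem.Dict.keys_foldl_insert (ν := Int) nums
    (fun d n => if d.contains n = false then 1 else d.getD n 0 + 1)
    (PySem.Dict.empty (κ := Int) (ν := Int))]
  have hupd : PySem.Set.update (PySem.Dict.empty (κ := Int) (ν := Int)).keys nums
      = PySem.Set.ofList nums := by
    rw [PySem.Set.ofList_eq_foldl]
    simp [PySem.Set.update, PySem.Dict.keys_empty]
  rw [hupd]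
  have hfs : (PySem.Set.ofList nums).toFinset = nums.toFinset := by
    ext y; simp [List.mem_toFinset, PySem.Set.mem_ofList]
  rw [← List.toFinset_card_of_nodup (PySem.Set.nodup_ofList nums), hfs]

-- B's scan over a sorted tail, starting from a previous element p bounding the tail.
theorem solnB_scan (s : List Int) (p : Int) (d : Int)
    (hpair : s.Pairwise (· ≤ ·)) (hp : ∀ y ∈ s, p ≤ y) :
    (s.foldl bstep (d, some p)).1 = d + ((s.toFinset.erase p).card : Int) := by
  induction s generalizing p d with
  | nil => simp
  | cons x t ih =>
    have hpair' := (List.pairwise_cons.mp hpair).2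
    have hx := (List.pairwise_cons.mp hpair).1
    by_cases hxp : x = p
    · subst hxp
      have hstep : bstep (d, some x) x = (d, some x) := by simp [bstep]
      simp only [List.foldl_cons, hstep]
      rw [ih x d hpair' hx]
      congr 2
      simp [Finset.erase_insert_eq_erase]
    · have hpx : p ≤ x := hp x (List.mem_cons_self ..)
      have hstep : bstep (d, some p) x = (d + 1, some x) := by
        simp [bstep, Ne.symm hxp]
      simp only [List.foldl_cons, hstep]
      rw [ih x (d + 1) hpair' hx]
      have hpnot : p ∉ (x :: t) := by
        intro hmem
        rcases List.mem_cons.mp hmem with h | h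
        · exact hxp h.symm
        · exact hxp (le_antisymm hpx (hx p h)).symm
      have h1 : ((x :: t).toFinset.erase p) = (x :: t).toFinset := by
        apply Finset.erase_eq_of_notMem; simp only [List.mem_toFinset]; exact hpnot
      have h2 : (x :: t).toFinset = insert x t.toFinset := by simp
      rw [h1, h2, card_insert_erase]
      push_cast
      ring

-- B's distinct count equals the number of distinct elements of nums.
theorem solnB_count (nums : List Int) :
    ((PySem.List.sorted nums (fun x => x) false).foldl bstep (0, none)).1
      = (nums.toFinset.card : Int) := by
  have hfin : (PySem.List.sorted nums (fun x => x) false).toFinset = nums.toFinset :=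
    List.toFinset_eq_of_perm _ _ (PySem.List.sorted_perm nums (fun x => x) false)
  have hpair : (PySem.List.sorted nums (fun x => x) false).Pairwise (· ≤ ·) :=
    PySem.List.sorted_pairwise nums (fun x => x)
  rw [← hfin]
  cases hs : PySem.List.sorted nums (fun x => x) false with
  | nil => simp
  | cons x t =>
    rw [hs] at hpair
    have hpair' := (List.pairwise_cons.mp hpair).2
    have hx := (List.pairwise_cons.mp hpair).1
    have hstep : bstep (0, none) x = (1, some x) := by simp [bstep]
    simp only [List.foldl_cons, hstep]
    rw [solnB_scan t x 1 hpair' hx]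
    have h2 : (x :: t).toFinset = insert x t.toFinset := by simp
    rw [h2, card_insert_erase]
    push_cast
    ring

-- ===== VERDICT (by name: the statement is the Claim_ definition above) =====
theorem solution_spec : Claim_equal_solution := by
  intro nums _
  unfold Spec_solution solution solution_alt
  simp only []
  rw [solnA_size, solnB_count]
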